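-- pv_equiv track=rewrite | github.com/pantsbuild/pants | src/python/pants/backend/python/dependency_inference/rules.py | _remove_ignored_imports
-- ===== SOURCE A (Python) =====
-- def _remove_ignored_imports(
--     unowned_imports: frozenset[str], ignored_paths: tuple[str, ...]
-- ) -> frozenset[str]:
--     """Remove unowned imports given a list of paths to ignore.
--
--     E.g. having
--     ```
--     import foo.bar
--     from foo.bar import baz
--     import foo.barley
--     ```
--
--     and passing `ignored-paths=["foo.bar"]`, only `foo.bar` and `foo.bar.baz` will be ignored.
--     """
--     if not ignored_paths:
--         return unowned_imports
--
--     unowned_imports_filtered = set()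
--     for unowned_import in unowned_imports:
--         if not any(
--             unowned_import == ignored_path or unowned_import.startswith(f"{ignored_path}.")
--             for ignored_path in ignored_paths
--         ):
--             unowned_imports_filtered.add(unowned_import)
--     return frozenset(unowned_imports_filtered)
-- ===== SOURCE B (Python) =====
-- def _remove_ignored_imports(
--     unowned_imports: frozenset[str], ignored_paths: tuple[str, ...]
-- ) -> frozenset[str]:
--     """Remove unowned imports given a list of paths to ignore.
--
--     Instead of testing every ignored path for each import, successively prune
--     the pool of imports with one pass per ignored path.
--     """
--     if not ignored_paths:
--         return unowned_imports
--
--     remaining = list(unowned_imports)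
--     for ignored_path in ignored_paths:
--         dotted = ignored_path + "."
--         remaining = [i for i in remaining if i != ignored_path and not i.startswith(dotted)]
--     return frozenset(remaining)
-- ===== Notes on version B (the rewrite author's own statement) =====
-- stated objective: alternative
-- what changed: Loop interchange: instead of scanning all ignored paths inside a per-import any(), B iterates over the ignored paths and prunes a shrinking pool of imports with one list-comprehension pass per path, precomputing each dotted prefix once.
import Mathlib
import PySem

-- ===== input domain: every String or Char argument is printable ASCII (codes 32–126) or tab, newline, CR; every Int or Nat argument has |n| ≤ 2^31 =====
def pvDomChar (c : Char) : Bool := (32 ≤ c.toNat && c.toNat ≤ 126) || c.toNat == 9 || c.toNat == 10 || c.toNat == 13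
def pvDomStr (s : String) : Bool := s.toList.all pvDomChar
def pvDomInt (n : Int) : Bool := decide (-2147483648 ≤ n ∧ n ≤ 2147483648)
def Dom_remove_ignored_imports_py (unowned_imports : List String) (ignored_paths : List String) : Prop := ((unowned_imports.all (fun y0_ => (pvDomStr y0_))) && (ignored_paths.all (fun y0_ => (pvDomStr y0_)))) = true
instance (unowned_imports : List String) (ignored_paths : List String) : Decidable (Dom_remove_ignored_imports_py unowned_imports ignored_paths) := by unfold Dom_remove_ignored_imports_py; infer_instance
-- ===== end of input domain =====

-- ===== PORT A =====
-- Literal transliteration of A: per-import any() scan over ignored_paths, accumulating a set.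
def remove_ignored_imports_py (unowned_imports : List String) (ignored_paths : List String) : List String :=
  if ignored_paths.isEmpty then unowned_imports
  else
    (unowned_imports.foldl
      (fun acc unowned_import =>
        if ignored_paths.any (fun ignored_path =>
            unowned_import == ignored_path ||
            PySem.Str.startswith unowned_import (ignored_path ++ ".")) then acc
        else PySem.Set.add acc unowned_import)
      PySem.Set.empty)

-- ===== PORT B =====
-- Literal transliteration of B: prune a shrinking pool of imports, one pass per ignored path.
def remove_ignored_imports_py_alt (unowned_imports : List String) (ignored_paths : List String) : List String :=
  if ignored_paths.isEmpty then unowned_imports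
  else
    let remaining := ignored_paths.foldl
      (fun rem ignored_path =>
        let dotted := ignored_path ++ "."
        rem.filter (fun i => i != ignored_path && !(PySem.Str.startswith i dotted)))
      unowned_imports
    PySem.Set.ofList remaining

-- ===== PRECONDITION & SPEC =====
def Spec_remove_ignored_imports_py (unowned_imports : List String) (ignored_paths : List String) (out : List String) : Prop := out = remove_ignored_imports_py_alt unowned_imports ignored_paths
instance (unowned_imports : List String) (ignored_paths : List String) (out : List String) : Decidable (Spec_remove_ignored_imports_py unowned_imports ignored_paths out) := by unfold Spec_remove_ignored_imports_py; infer_instance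

-- ===== CLAIM (what is proved, stated in full; the proofs are below) =====
def Claim_equal_remove_ignored_imports_py : Prop := ∀ (unowned_imports : List String) (ignored_paths : List String), Dom_remove_ignored_imports_py unowned_imports ignored_paths → Spec_remove_ignored_imports_py unowned_imports ignored_paths (remove_ignored_imports_py unowned_imports ignored_paths)

-- ===== LEMMAS AND PROOFS =====

theorem foldl_filter_eq_filter_all {α β : Type} (g : β → α → Bool) :
    ∀ (ip : List β) (ui : List α),
      ip.foldl (fun rem p => rem.filter (g p)) ui = ui.filter (fun i => ip.all (fun p => g p i)) := by
  intro ip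
  induction ip with
  | nil => intro ui; simp
  | cons p ps ih =>
      intro ui
      simp only [List.foldl_cons, ih, List.filter_filter, List.all_cons]
      congr 1
      funext a
      exact Bool.and_comm _ _

theorem foldl_addif_eq_foldl_add_filter {α : Type} [BEq α] (c : α → Bool) :
    ∀ (ui : List α) (acc : PySem.Set α),
      ui.foldl (fun acc i => if c i then acc else PySem.Set.add acc i) acc
        = (ui.filter (fun i => !c i)).foldl PySem.Set.add acc := by
  intro ui
  induction ui with
  | nil => intro acc; rfl
  | cons x xs ih =>
      intro acc
      by_cases h : c x = true
      · simp [h, ih]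
      · simp only [Bool.not_eq_true] at h
        simp [h, ih]

theorem not_any_match_eq_all_keep (i : String) :
    ∀ ps : List String,
      (!ps.any fun p => i == p || PySem.Str.startswith i (p ++ ".")) =
        ps.all fun p => i != p && !PySem.Str.startswith i (p ++ ".") := by
  intro ps
  induction ps with
  | nil => rfl
  | cons p ps ih =>
      simp only [List.any_cons, List.all_cons, ← ih]
      simp [bne, Bool.not_or]

-- ===== VERDICT (by name: the statement is the Claim_ definition above) =====
theorem remove_ignored_imports_py_spec : Claim_equal_remove_ignored_imports_py := by
  intro unowned_imports ignored_paths _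
  unfold Spec_remove_ignored_imports_py remove_ignored_imports_py remove_ignored_imports_py_alt
  by_cases hnil : ignored_paths.isEmpty
  · simp [hnil]
  · simp only [hnil]
    rw [foldl_filter_eq_filter_all, PySem.Set.ofList_eq_foldl,
        foldl_addif_eq_foldl_add_filter]
    show List.foldl PySem.Set.add [] _ = List.foldl PySem.Set.add [] _
    congr 1
    apply List.filter_congr
    intro i _
    exact not_any_match_eq_all_keep i ignored_paths
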